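-- pv_equiv track=rewrite | github.com/srinivaschakrapani/python-learnings | CN_Algorithms/Recursion_Assignment/CheckAB.py | CheckAB
-- ===== SOURCE A (Python) =====
-- def CheckAB(source):
--     if len(source) == 0:
--         return True
--     if len(source) == 1 and source[0] == 'a':
--         return True
--     else:
--         if source[0] == 'a':
--             if source[1] == 'a' or source[1] == '':
--                 return True and CheckAB(source[1:])
--             else:
--                 if source[1:3] == 'bb':
--                     return True and CheckAB(source[3:])
--                 else:
--                     return False
--         else:
--             if len(source) > 1:
--                 if source[1:2] == 'b':
--                     return True and CheckAB(source[1:])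
--                 else:
--                     if source[1:3] == 'ba':
--                         return True and CheckAB(source[3:])
--                     else:
--                         return False
--             else:
--                 return False
-- ===== SOURCE B (Python) =====
-- def CheckAB(source):
--     i, n = 0, len(source)
--     while i < n:
--         if source[i] != 'a':
--             return False
--         if i + 1 < n and source[i + 1] == 'b':
--             if i + 2 < n and source[i + 2] == 'b':
--                 i += 3
--             else:
--                 return False
--         else:
--             i += 1
--     return True
-- ===== Notes on version B (the rewrite author's own statement) =====
-- stated objective: faster
-- what changed: Replaces the recursive validator, whose every call slices off and copies the remaining string, with a single left-to-right index-pointer loop that checks the allowed one- and three-character tokens in place.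
import Mathlib
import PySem

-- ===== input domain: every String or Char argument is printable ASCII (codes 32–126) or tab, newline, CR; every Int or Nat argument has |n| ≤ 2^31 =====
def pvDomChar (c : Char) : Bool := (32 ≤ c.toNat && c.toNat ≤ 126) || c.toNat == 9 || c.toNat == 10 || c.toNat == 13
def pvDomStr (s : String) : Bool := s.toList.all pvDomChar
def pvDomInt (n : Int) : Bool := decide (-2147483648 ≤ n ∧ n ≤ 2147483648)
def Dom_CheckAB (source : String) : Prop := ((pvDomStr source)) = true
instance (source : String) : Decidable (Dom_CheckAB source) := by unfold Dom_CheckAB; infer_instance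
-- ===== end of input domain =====

-- B replaces A's recursive string-slicing validation with a one-pass index-pointer loop (objective: faster, O(n) vs A's O(n^2) slicing).

-- ===== PORT A =====
-- Literal port of A's recursion over the remaining string (slices via PySem.List.slice).
-- Python's "source[1] == ''" compares a char with the empty string and is always False; it is ported as the always-false disjunct below.
def aRec (l : List Char) : Bool :=
  if _h0 : l.length = 0 then true
  else if l.length = 1 ∧ PySem.List.pyGet? l 0 = some 'a' then true
  else
    if PySem.List.pyGet? l 0 = some 'a' then
      if PySem.List.pyGet? l 1 = some 'a' ∨ False then
        aRec (PySem.List.slice l (some 1) none)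
      else
        if PySem.List.slice l (some 1) (some 3) = ['b', 'b'] then
          aRec (PySem.List.slice l (some 3) none)
        else false
    else
      if 1 < l.length then
        if PySem.List.slice l (some 1) (some 2) = ['b'] then
          aRec (PySem.List.slice l (some 1) none)
        else
          if PySem.List.slice l (some 1) (some 3) = ['b', 'a'] then
            aRec (PySem.List.slice l (some 3) none)
          else false
      else false
termination_by l.length
decreasing_by
  all_goals simp [PySem.List.slice_from_natCast, PySem.List.slice]
  all_goals omega

def CheckAB (source : String) : Bool := aRec source.toList

-- ===== PORT B =====
-- Literal port of Source B's while-loop: an index pointer i over the unchanged string.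
def bGo (s : List Char) (i : Nat) : Bool :=
  if h : i < s.length then
    if s[i] ≠ 'a' then false
    else if i + 1 < s.length ∧ s.getD (i + 1) ' ' = 'b' then
      if i + 2 < s.length ∧ s.getD (i + 2) ' ' = 'b' then bGo s (i + 3)
      else false
    else bGo s (i + 1)
  else true
termination_by s.length - i

def CheckAB_alt (source : String) : Bool := bGo source.toList 0

-- ===== PRECONDITION & SPEC =====
def Spec_CheckAB (source : String) (out : Bool) : Prop := out = CheckAB_alt source
instance (source : String) (out : Bool) : Decidable (Spec_CheckAB source out) := by unfold Spec_CheckAB; infer_instance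

-- ===== CLAIM (what is proved, stated in full; the proofs are below) =====
def Claim_equal_CheckAB : Prop := ∀ (source : String), Dom_CheckAB source → Spec_CheckAB source (CheckAB source)

-- ===== LEMMAS AND PROOFS =====

-- A's non-'a' branch can never return true: each step keeps a non-'a' ('b') in front,
-- and a final one-char "b" fails the length-1 test.
lemma aRec_false_of_head_ne (c : Char) (rest : List Char) (hc : c ≠ 'a') :
    aRec (c :: rest) = false := by
  induction rest generalizing c with
  | nil => rw [aRec]; simp [PySem.List.pyGet?, PySem.List.pyIdx?, hc]
  | cons d rest ih =>
    rw [aRec]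
    simp [pysem, hc]
    by_cases hd : d = 'b'
    · simp [hd]; exact ih 'b' (by decide)
    · simp [hd]

-- Loop invariant: B's pointer loop from index i computes exactly what A's recursion
-- computes on the remaining suffix.
set_option maxHeartbeats 2000000 in
lemma bGo_eq_aRec_drop (s : List Char) (i : Nat) : bGo s i = aRec (s.drop i) := by
  fun_induction bGo s i with
  | case1 i h hne =>
    -- s[i] ≠ 'a' : both sides false
    rw [List.drop_eq_getElem_cons h]
    cases hr : s.drop (i + 1) with
    | nil => rw [aRec]; simp [PySem.List.pyGet?, PySem.List.pyIdx?, hne]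
    | cons d t => exact (aRec_false_of_head_ne _ _ hne).symm
  | case2 i h ha hb hbb ih =>
    -- s[i] = 'a', s[i+1] = 'b', s[i+2] = 'b' : advance by 3 (token "abb")
    simp only [ne_eq, not_not] at ha
    obtain ⟨h1, hb1⟩ := hb; obtain ⟨h2, hb2⟩ := hbb
    rw [List.getD_eq_getElem _ _ h1] at hb1
    rw [List.getD_eq_getElem _ _ h2] at hb2
    rw [List.drop_eq_getElem_cons h, List.drop_eq_getElem_cons h1, List.drop_eq_getElem_cons h2]
    rw [aRec]
    simp [pysem, ha, hb1, hb2]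
    simpa using ih
  | case3 i h ha hb hbb =>
    -- s[i] = 'a', s[i+1] = 'b', but no second 'b' : both false
    simp only [ne_eq, not_not] at ha
    obtain ⟨h1, hb1⟩ := hb
    rw [List.getD_eq_getElem _ _ h1] at hb1
    rw [List.drop_eq_getElem_cons h, List.drop_eq_getElem_cons h1]
    rw [aRec]
    cases hr : s.drop (i + 2) with
    | nil => simp [pysem, ha, hb1]
    | cons e t =>
      have h2 : i + 2 < s.length := by
        have hlen : (s.drop (i + 2)).length = s.length - (i + 2) := by simp
        rw [hr] at hlen; simp at hlen; omega
      have he : e = s[i + 2] := by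
        have hh := List.drop_eq_getElem_cons (l := s) h2; rw [hr] at hh
        exact (List.cons_eq_cons.mp hh).1
      have heb : e ≠ 'b' := fun hh => hbb ⟨h2, by rw [List.getD_eq_getElem _ _ h2, ← he, hh]⟩
      simp [pysem, ha, hb1, heb]
  | case4 i h ha hb ih =>
    -- s[i] = 'a', next is not 'b' (or absent) : advance by 1 (token "a")
    simp only [ne_eq, not_not] at ha
    rw [List.drop_eq_getElem_cons h, aRec]
    cases hr : s.drop (i + 1) with
    | nil =>
      rw [hr] at ih; rw [aRec] at ih
      simp [pysem, PySem.List.pyGet?, PySem.List.pyIdx?, ha, ih]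
    | cons d t =>
      have h1 : i + 1 < s.length := by
        have hlen : (s.drop (i + 1)).length = s.length - (i + 1) := by simp
        rw [hr] at hlen; simp at hlen; omega
      have hd : d = s[i + 1] := by
        have hh := List.drop_eq_getElem_cons (l := s) h1; rw [hr] at hh
        exact (List.cons_eq_cons.mp hh).1
      have hdb : d ≠ 'b' := fun hh => hb ⟨h1, by rw [List.getD_eq_getElem _ _ h1, ← hd, hh]⟩
      rw [hr] at ih
      by_cases hda : d = 'a'
      · simp [pysem, ha, hda, ih]
      · rw [ih, aRec_false_of_head_ne d t hda, aRec]
        simp [pysem, ha, hda, hdb]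
  | case5 i h =>
    rw [List.drop_eq_nil_of_le (by omega), aRec]; simp

-- ===== VERDICT (by name: the statement is the Claim_ definition above) =====
theorem CheckAB_spec : Claim_equal_CheckAB := by
  intro source _
  unfold Spec_CheckAB CheckAB CheckAB_alt
  exact (bGo_eq_aRec_drop source.toList 0).symm
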